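-- pv_equiv track=rewrite | github.com/steveleecode/Nova | src/gui/app.py | _group_by_size
-- ===== SOURCE A (Python) =====
-- from typing import Dict, List
--
-- def _group_by_size(file_data: List[Dict]) -> Dict[int, List[Dict]]:
--     """Group files by size for duplicate detection."""
--     size_groups = {}
--     for file in file_data:
--         size = file["size"]
--         if size not in size_groups:
--             size_groups[size] = []
--         size_groups[size].append(file)
--     return size_groups
-- ===== SOURCE B (Python) =====
-- def _group_by_size(file_data):
--     """Group files by size: one dict comprehension over the distinct sizes
--     (in first-occurrence order), each key's bucket built by filtering."""
--     sizes = [f["size"] for f in file_data]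
--     return {s: [f for f, sz in zip(file_data, sizes) if sz == s]
--             for s in dict.fromkeys(sizes)}
-- ===== Notes on version B (the rewrite author's own statement) =====
-- stated objective: alternative
-- what changed: Replaces the incremental dict-of-lists append loop by a two-pass dict comprehension: extract all sizes, dedup them in first-occurrence order with dict.fromkeys, and build each size's bucket by filtering the zipped list.
import Mathlib
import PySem

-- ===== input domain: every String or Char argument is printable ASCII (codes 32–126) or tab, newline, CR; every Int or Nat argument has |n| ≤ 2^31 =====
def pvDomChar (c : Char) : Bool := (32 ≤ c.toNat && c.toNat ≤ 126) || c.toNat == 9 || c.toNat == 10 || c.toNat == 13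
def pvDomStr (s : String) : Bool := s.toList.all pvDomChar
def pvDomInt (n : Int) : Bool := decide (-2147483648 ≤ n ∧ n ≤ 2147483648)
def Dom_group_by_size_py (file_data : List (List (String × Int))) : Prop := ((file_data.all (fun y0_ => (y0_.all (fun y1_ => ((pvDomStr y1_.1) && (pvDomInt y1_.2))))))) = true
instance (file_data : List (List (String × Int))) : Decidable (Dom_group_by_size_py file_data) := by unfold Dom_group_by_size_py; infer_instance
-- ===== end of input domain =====

-- B groups by a dict comprehension over the deduped size list instead of A's incremental append loop; return values proved equal (A returns a dict; equality here is of its items in insertion order).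

-- ===== PORT A =====
-- file["size"]: first building the Python dict from the pair list (duplicate keys: last wins),
-- then looking up "size"; under Pre_ the lookup succeeds, so the .getD default is never used.
def pvSz (f : List (String × Int)) : Int := ((PySem.Dict.ofList f).get? "size").getD 0

def group_by_size_py (file_data : List (List (String × Int))) : List (Int × List (List (String × Int))) :=
  (file_data.foldl (fun d f =>
      let size := pvSz f
      let d' := if d.contains size then d else d.insert size []
      d'.modify size [] (· ++ [f]))
    PySem.Dict.empty).items

-- ===== PORT B =====
-- the dict comprehension's keys (dedup sizes) are distinct, so the resulting dict's items
-- are exactly this list of pairs in that key order.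
def group_by_size_py_alt (file_data : List (List (String × Int))) : List (Int × List (List (String × Int))) :=
  let sizes := file_data.map pvSz
  (PySem.List.dedup sizes).map (fun s =>
    (s, ((file_data.zip sizes).filter (fun p => p.2 == s)).map (·.1)))

-- ===== PRECONDITION & SPEC =====
-- Pre_ excludes exactly the inputs where some file lacks the "size" key, on which A raises KeyError.
def Pre_group_by_size_py (file_data : List (List (String × Int))) : Prop :=
  ∀ f ∈ file_data, "size" ∈ f.map Prod.fst
instance (file_data : List (List (String × Int))) : Decidable (Pre_group_by_size_py file_data) := by unfold Pre_group_by_size_py; infer_instance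

def pvWitness_group_by_size_py : (List (List (String × Int))) := [[("size", 3), ("mtime", 7)], [("size", 3)]]

def Spec_group_by_size_py (file_data : List (List (String × Int))) (out : List (Int × List (List (String × Int)))) : Prop := out = group_by_size_py_alt file_data
instance (file_data : List (List (String × Int))) (out : List (Int × List (List (String × Int)))) : Decidable (Spec_group_by_size_py file_data out) := by unfold Spec_group_by_size_py; infer_instance

-- ===== CLAIM (what is proved, stated in full; the proofs are below) =====
def Claim_equal_group_by_size_py : Prop := ∀ (file_data : List (List (String × Int))), Dom_group_by_size_py file_data → Pre_group_by_size_py file_data → Spec_group_by_size_py file_data (group_by_size_py file_data)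

-- ===== LEMMAS AND PROOFS =====

-- A's loop body ('ensure key, then append') is one modify-with-default.
theorem pv_step_eq (d : PySem.Dict Int (List (List (String × Int)))) (f : List (String × Int)) :
    (let size := pvSz f
     let d' := if d.contains size then d else d.insert size []
     d'.modify size [] (· ++ [f])) = d.modify (pvSz f) [] (· ++ [f]) := by
  by_cases h : d.contains (pvSz f) = true
  · simp [h]
  · have h' : d.contains (pvSz f) = false := by simpa using h
    have hd : d.getD (pvSz f) [] = [] := by
      simp [PySem.Dict.getD_of_not_contains, h']
    simp [h', PySem.Dict.modify, PySem.Dict.getD_insert_self,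
      PySem.Dict.insert_insert_self, hd]

theorem pv_fold_eq (file_data : List (List (String × Int))) :
    group_by_size_py file_data =
      ((file_data.map (fun f => (pvSz f, f))).foldl
        (fun d p => d.modify p.1 [] (· ++ [p.2])) PySem.Dict.empty).items := by
  unfold group_by_size_py
  rw [List.foldl_map]
  have hstep : (fun (d : PySem.Dict Int (List (List (String × Int)))) (f : List (String × Int)) =>
      let size := pvSz f
      let d' := if d.contains size then d else d.insert size []
      d'.modify size [] (· ++ [f])) = fun d f => d.modify (pvSz f) [] (· ++ [f]) :=
    funext fun d => funext fun f => pv_step_eq d f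
  rw [hstep]

theorem pv_zip_eq (l : List (List (String × Int))) :
    l.zip (l.map pvSz) = l.map (fun f => (f, pvSz f)) := by
  induction l with
  | nil => rfl
  | cons a t ih => simpa using ih

theorem group_by_size_py_spec' (file_data : List (List (String × Int))) :
    group_by_size_py file_data = group_by_size_py_alt file_data := by
  rw [pv_fold_eq]
  set pairs := file_data.map (fun f => (pvSz f, f)) with hp
  set D := pairs.foldl (fun d p => d.modify p.1 [] (· ++ [p.2])) PySem.Dict.empty with hD
  have hkeys : D.keys = PySem.Set.ofList (file_data.map pvSz) := by
    rw [hD, PySem.Dict.keys_foldl_modify_key]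
    simp [hp, PySem.Set.update_nil_left, List.map_map, Function.comp_def]
  have hnd : D.keys.Nodup := by rw [hkeys]; exact PySem.Set.nodup_ofList _
  rw [PySem.Dict.items_eq_map_keys D hnd []]
  rw [hkeys]
  unfold group_by_size_py_alt
  simp only [PySem.List.dedup_eq_ofList]
  apply List.map_congr_left
  intro k _
  have hval : D.getD k [] = (pairs.filter (fun p => p.1 == k)).map (·.2) := by
    rw [hD, PySem.Dict.getD_foldl_modify_append]
    simp
  rw [hval]
  have hzip := pv_zip_eq file_data
  simp [hp, hzip, List.filter_map, List.map_map, Function.comp_def]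

-- ===== VERDICT (by name: the statement is the Claim_ definition above) =====
theorem group_by_size_py_spec : Claim_equal_group_by_size_py := by
  intro file_data _ _
  exact group_by_size_py_spec' file_data
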